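-- pv_equiv track=rewrite | github.com/FelixZhang028/waste_incineration | scripts/eval_with_rules.py | _label_names_by_id
-- ===== SOURCE A (Python) =====
-- def _label_names_by_id(label_map: dict[str, int]) -> list[str]:
--     pairs = sorted(((idx, name) for name, idx in label_map.items()), key=lambda x: x[0])
--     if not pairs:
--         raise ValueError("label_map cannot be empty")
--     got = [idx for idx, _ in pairs]
--     if got != list(range(len(pairs))):
--         raise ValueError(f"label ids must be contiguous from 0, got {got}")
--     return [name for _, name in pairs]
-- ===== SOURCE B (Python) =====
-- def _label_names_by_id(label_map: dict[str, int]) -> list[str]: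
--     n = len(label_map)
--     if n == 0:
--         raise ValueError("label_map cannot be empty")
--     result = [None] * n
--     for name, idx in label_map.items():
--         if not (isinstance(idx, int) and 0 <= idx < n) or result[idx] is not None:
--             got = sorted(label_map.values())
--             raise ValueError(f"label ids must be contiguous from 0, got {got}")
--         result[idx] = name
--     return result
-- ===== Notes on version B (the rewrite author's own statement) =====
-- stated objective: faster
-- what changed: Replaces sort-then-check-contiguity with a single O(n) scatter into a preallocated array indexed by id, detecting invalid ids and duplicates via the slot guard.
import Mathlib
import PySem

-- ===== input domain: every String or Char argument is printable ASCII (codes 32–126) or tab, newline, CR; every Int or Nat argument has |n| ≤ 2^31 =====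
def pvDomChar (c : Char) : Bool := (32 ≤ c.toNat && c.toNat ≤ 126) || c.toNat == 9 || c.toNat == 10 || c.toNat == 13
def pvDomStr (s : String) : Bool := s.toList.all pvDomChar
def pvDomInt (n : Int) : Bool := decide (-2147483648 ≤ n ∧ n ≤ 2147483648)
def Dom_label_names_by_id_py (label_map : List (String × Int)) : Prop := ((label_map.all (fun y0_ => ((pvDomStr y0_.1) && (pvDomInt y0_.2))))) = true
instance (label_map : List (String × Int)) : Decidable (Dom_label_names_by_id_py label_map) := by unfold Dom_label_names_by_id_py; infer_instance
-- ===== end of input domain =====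

-- B replaces A's sort-then-check-contiguity with a single O(n) scatter into a
-- preallocated slot array indexed by id; Pre_ excludes exactly the inputs where A raises.


-- ===== PORT A =====
def label_names_by_id_py (label_map : List (String × Int)) : List String :=
  let pairs := PySem.List.sorted (label_map.map (fun p => (p.2, p.1))) (fun x => x.1) false
  if pairs = [] then []  -- raise ValueError("label_map cannot be empty")
  else
    let got := pairs.map Prod.fst
    if got ≠ (List.range pairs.length).map Int.ofNat then []  -- raise ValueError("label ids must be contiguous from 0, got {got}")
    else pairs.map Prod.snd

-- ===== PORT B =====
-- the scatter loop of Source B: place each name at slot idx; none = the ValueError path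
def pvLoopB (n : Nat) : List (String × Int) → List (Option String) → Option (List (Option String))
  | [], res => some res
  | (name, idx) :: rest, res =>
      if 0 ≤ idx ∧ idx < (n : Int) ∧ res.getD idx.toNat none = none then
        pvLoopB n rest (res.set idx.toNat (some name))
      else none  -- raise ValueError("label ids must be contiguous from 0, got {got}")

def label_names_by_id_py_alt (label_map : List (String × Int)) : List String :=
  let n := label_map.length
  if n = 0 then []  -- raise ValueError("label_map cannot be empty")
  else
    match pvLoopB n label_map (List.replicate n none) with
    | none => []  -- raise ValueError(...)
    | some res => res.filterMap id  -- every slot is filled on this path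

-- ===== PRECONDITION & SPEC =====
-- Pre_ = exactly the inputs where A returns: nonempty and the ids are 0..n-1 in some
-- order; it additionally requires distinct keys, since the argument models a Python
-- dict (duplicate keys cannot occur in a dict, so this excludes no genuine input).
def Pre_label_names_by_id_py (label_map : List (String × Int)) : Prop :=
  label_map ≠ [] ∧ (label_map.map Prod.fst).Nodup ∧
    (label_map.map Prod.snd).Perm ((List.range label_map.length).map (fun (k : Nat) => (k : Int)))
instance (label_map : List (String × Int)) : Decidable (Pre_label_names_by_id_py label_map) := by unfold Pre_label_names_by_id_py; infer_instance

def pvWitness_label_names_by_id_py : (List (String × Int)) := [("b", 1), ("a", 0), ("c", 2)]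

def Spec_label_names_by_id_py (label_map : List (String × Int)) (out : List String) : Prop := out = label_names_by_id_py_alt label_map
instance (label_map : List (String × Int)) (out : List String) : Decidable (Spec_label_names_by_id_py label_map out) := by unfold Spec_label_names_by_id_py; infer_instance

-- ===== CLAIM (what is proved, stated in full; the proofs are below) =====
def Claim_equal_label_names_by_id_py : Prop := ∀ (label_map : List (String × Int)), Dom_label_names_by_id_py label_map → Pre_label_names_by_id_py label_map → Spec_label_names_by_id_py label_map (label_names_by_id_py label_map)

-- ===== LEMMAS AND PROOFS =====

-- the common normal form: the name carrying id i, for i = 0..n-1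
def pvNameAt (m : List (String × Int)) (i : Int) : String :=
  ((m.find? (fun p => p.2 == i)).map Prod.fst).getD ""

def pvCanon (m : List (String × Int)) : List String :=
  (List.range m.length).map (fun (k : Nat) => pvNameAt m (k : Int))

-- under nodup ids, find? at id i returns exactly the member carrying id i
theorem pv_find?_of_mem {m : List (String × Int)} {s : String} {i : Int}
    (hnd : (m.map Prod.snd).Nodup) (hmem : (s, i) ∈ m) :
    m.find? (fun p => p.2 == i) = some (s, i) := by
  induction m with
  | nil => cases hmem
  | cons a t ih =>
    simp only [List.map_cons, List.nodup_cons] at hnd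
    rcases List.mem_cons.mp hmem with h | h
    · subst h; simp
    · have hne : a.2 ≠ i := by
        intro he
        exact hnd.1 (he ▸ (List.mem_map.mpr ⟨(s, i), h, rfl⟩))
      have hb : (a.2 == i) = false := by simpa using hne
      simp only [List.find?_cons, hb]
      exact ih hnd.2 h

theorem pv_ids_nodup {m : List (String × Int)}
    (hperm : (m.map Prod.snd).Perm ((List.range m.length).map (fun (k : Nat) => (k : Int)))) :
    (m.map Prod.snd).Nodup :=
  hperm.nodup_iff.mpr (List.Nodup.map (fun _ _ h => by exact_mod_cast h) List.nodup_range)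

theorem pv_mem_iff {m : List (String × Int)}
    (hperm : (m.map Prod.snd).Perm ((List.range m.length).map (fun (k : Nat) => (k : Int))))
    (s : String) (i : Int) :
    (s, i) ∈ m ↔ ∃ k : Nat, k < m.length ∧ i = (k : Int) ∧ pvNameAt m i = s := by
  have hnd := pv_ids_nodup hperm
  constructor
  · intro hmem
    have hi : i ∈ (List.range m.length).map (fun (k : Nat) => (k : Int)) :=
      hperm.mem_iff.mp (List.mem_map.mpr ⟨(s, i), hmem, rfl⟩)
    rcases List.mem_map.mp hi with ⟨k, hk, hki⟩
    refine ⟨k, List.mem_range.mp hk, hki.symm, ?_⟩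
    simp [pvNameAt, pv_find?_of_mem hnd hmem]
  · rintro ⟨k, hk, rfl, hname⟩
    have hi : (k : Int) ∈ m.map Prod.snd :=
      hperm.mem_iff.mpr (List.mem_map.mpr ⟨k, List.mem_range.mpr hk, rfl⟩)
    rcases List.mem_map.mp hi with ⟨p, hp, hpi⟩
    have hp' : (p.1, (k : Int)) ∈ m := by rw [← hpi]; exact hp
    have hfind : m.find? (fun q => q.2 == (k : Int)) = some (p.1, (k : Int)) :=
      pv_find?_of_mem hnd hp'
    have hpn : pvNameAt m ((k : Int)) = p.1 := by simp [pvNameAt, hfind]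
    have hs : s = p.1 := by rw [← hname, hpn]
    subst hs
    exact hp'

-- ============ A's side: sorted pairs are the canonical list ============
def pvYs (m : List (String × Int)) : List (Int × String) :=
  (List.range m.length).map (fun (k : Nat) => ((k : Int), pvNameAt m (k : Int)))

theorem pvA_eq_canon (m : List (String × Int)) (hpre : Pre_label_names_by_id_py m) :
    label_names_by_id_py m = pvCanon m := by
  obtain ⟨hne, _hkeys, hperm⟩ := hpre
  have hnd := pv_ids_nodup hperm
  have hysnd : (pvYs m).Nodup := by
    have h1 : ((pvYs m).map Prod.fst).Nodup := by
      simp only [pvYs, List.map_map]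
      refine List.Nodup.map ?_ List.nodup_range
      intro a b h
      simp only [Function.comp_def] at h
      exact_mod_cast h
    exact h1.of_map _
  have hmnd : (m.map (fun p => (p.2, p.1))).Nodup := by
    have h1 : ((m.map (fun p => (p.2, p.1))).map Prod.fst).Nodup := by
      simpa [List.map_map, Function.comp] using hnd
    exact h1.of_map _
  have hperm2 : (pvYs m).Perm (m.map (fun p => (p.2, p.1))) := by
    rw [List.perm_ext_iff_of_nodup hysnd hmnd]
    rintro ⟨i, s⟩
    simp only [pvYs, List.mem_map, List.mem_range, Prod.mk.injEq]
    constructor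
    · rintro ⟨k, hk, rfl, rfl⟩
      exact ⟨(pvNameAt m ((k : Int)), (k : Int)),
        (pv_mem_iff hperm _ _).mpr ⟨k, hk, rfl, rfl⟩, rfl, rfl⟩
    · rintro ⟨p, hp, h1, h2⟩
      have hmem : (s, i) ∈ m := by
        have hps : p = (s, i) := by cases p; simp_all
        rwa [← hps]
      rcases (pv_mem_iff hperm s i).mp hmem with ⟨k, hk, rfl, hname⟩
      exact ⟨k, hk, rfl, by rw [hname]⟩
  have hpw : (pvYs m).Pairwise (fun a b => a.1 < b.1) := by
    exact List.Pairwise.map _ (fun a b (h : a < b) => by simpa using h) List.pairwise_lt_range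
  have hsorted :
      PySem.List.sorted (m.map (fun p => (p.2, p.1))) (fun x => x.1) false = pvYs m :=
    PySem.List.sorted_eq_of_perm_of_pairwise_lt _ _ _ hperm2 hpw
  have hlen : (pvYs m).length = m.length := by simp [pvYs]
  have hys_ne : pvYs m ≠ [] := by
    intro h
    apply hne
    have : m.length = 0 := by rw [← hlen, h]; rfl
    exact List.eq_nil_of_length_eq_zero this
  simp only [label_names_by_id_py, hsorted]
  rw [if_neg hys_ne]
  have hgot : (pvYs m).map Prod.fst = (List.range (pvYs m).length).map Int.ofNat := by
    simp [pvYs, List.map_map, Function.comp]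
  rw [if_neg (by simpa using hgot)]
  simp [pvYs, pvCanon, List.map_map, Function.comp]

-- ============ B's side: the scatter loop fills the canonical list ============
theorem pv_getD_set_ne (res : List (Option String)) (i j : Nat) (v : Option String)
    (h : i ≠ j) : (res.set i v).getD j none = res.getD j none := by
  simp [List.getD, List.getElem?_set_ne h]

theorem pv_length_foldl_set (l : List (String × Int)) (res : List (Option String)) :
    (l.foldl (fun r p => r.set p.2.toNat (some p.1)) res).length = res.length := by
  induction l generalizing res with
  | nil => rfl
  | cons a t ih => simp [List.foldl_cons, ih]

theorem pv_loopB_eq_foldl (n : Nat) (l : List (String × Int)) (res : List (Option String))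
    (hids : ∀ p ∈ l, ∃ k : Nat, k < n ∧ p.2 = (k : Int))
    (hnd : (l.map Prod.snd).Nodup)
    (hslots : ∀ p ∈ l, res.getD p.2.toNat none = none) :
    pvLoopB n l res = some (l.foldl (fun r p => r.set p.2.toNat (some p.1)) res) := by
  induction l generalizing res with
  | nil => rfl
  | cons a t ih =>
    obtain ⟨name, idx⟩ := a
    obtain ⟨k, hk, hkid0⟩ := hids (name, idx) (List.mem_cons_self)
    have hkid : idx = (k : Int) := hkid0
    have hguard : 0 ≤ idx ∧ idx < (n : Int) ∧ res.getD idx.toNat none = none :=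
      ⟨by omega, by omega, hslots (name, idx) (List.mem_cons_self)⟩
    have hnd2 : (name, idx).2 ∉ t.map Prod.snd ∧ (t.map Prod.snd).Nodup := by
      rw [List.map_cons] at hnd; exact List.nodup_cons.mp hnd
    simp only [pvLoopB, if_pos hguard, List.foldl_cons]
    apply ih
    · intro p hp; exact hids p (List.mem_cons_of_mem _ hp)
    · exact hnd2.2
    · intro p hp
      have hne2 : idx ≠ p.2 := by
        intro he
        exact hnd2.1 (he ▸ (List.mem_map.mpr ⟨p, hp, rfl⟩))
      obtain ⟨k', _, hkid0'⟩ := hids p (List.mem_cons_of_mem _ hp)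
      have hkid' : p.2 = (k' : Int) := hkid0'
      have hne : idx.toNat ≠ p.2.toNat := by omega
      rw [pv_getD_set_ne res idx.toNat p.2.toNat (some name) hne]
      exact hslots p (List.mem_cons_of_mem _ hp)

theorem pv_foldl_set_getElem (l : List (String × Int)) (res : List (Option String)) (j : Nat)
    (hj : j < res.length)
    (hids : ∀ p ∈ l, 0 ≤ p.2)
    (hnd : (l.map Prod.snd).Nodup) :
    (l.foldl (fun r p => r.set p.2.toNat (some p.1)) res)[j]? =
      match l.find? (fun p => p.2 == (j : Int)) with
      | some p => some (some p.1)
      | none => res[j]? := by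
  induction l generalizing res with
  | nil => rfl
  | cons a t ih =>
    have hnd' : a.2 ∉ t.map Prod.snd ∧ (t.map Prod.snd).Nodup := by
      rw [List.map_cons] at hnd; exact List.nodup_cons.mp hnd
    by_cases hc : a.2 = (j : Int)
    · have hcb : (a.2 == (j : Int)) = true := by simpa using hc
      have hnone : t.find? (fun p => p.2 == (j : Int)) = none := by
        rw [List.find?_eq_none]
        intro p hp
        simp only [beq_iff_eq]
        intro hpc
        exact hnd'.1 ((hc.trans hpc.symm) ▸ (List.mem_map.mpr ⟨p, hp, rfl⟩))
      rw [List.foldl_cons,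
        ih (res.set a.2.toNat (some a.1)) (by simpa using hj)
          (fun p hp => hids p (List.mem_cons_of_mem _ hp)) hnd'.2]
      have htn : a.2.toNat = j := by omega
      simp only [List.find?_cons, hcb, hnone, htn]
      exact List.getElem?_set_self (by simpa using hj)
    · have hcb : (a.2 == (j : Int)) = false := by simpa using hc
      rw [List.foldl_cons,
        ih (res.set a.2.toNat (some a.1)) (by simpa using hj)
          (fun p hp => hids p (List.mem_cons_of_mem _ hp)) hnd'.2]
      have hne : a.2.toNat ≠ j := by
        intro he
        have h0 : 0 ≤ a.2 := hids a (List.mem_cons_self)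
        apply hc
        omega
      simp only [List.find?_cons, hcb]
      cases hfind : t.find? (fun p => p.2 == (j : Int)) with
      | some p => rfl
      | none => exact List.getElem?_set_ne hne

theorem pvB_eq_canon (m : List (String × Int)) (hpre : Pre_label_names_by_id_py m) :
    label_names_by_id_py_alt m = pvCanon m := by
  obtain ⟨hne, _hkeys, hperm⟩ := hpre
  have hnd := pv_ids_nodup hperm
  have hids : ∀ p ∈ m, ∃ k : Nat, k < m.length ∧ p.2 = (k : Int) := by
    intro p hp
    have hmem : p.2 ∈ (List.range m.length).map (fun (k : Nat) => (k : Int)) :=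
      hperm.mem_iff.mp (List.mem_map.mpr ⟨p, hp, rfl⟩)
    rcases List.mem_map.mp hmem with ⟨k, hk, hki⟩
    exact ⟨k, List.mem_range.mp hk, hki.symm⟩
  have hn0 : ¬ (m.length = 0) := fun h => hne (List.eq_nil_of_length_eq_zero h)
  simp only [label_names_by_id_py_alt]
  rw [if_neg hn0,
    pv_loopB_eq_foldl m.length m (List.replicate m.length none) hids hnd
      (fun p _ => by simp [List.getD])]
  have hfold : m.foldl (fun r p => r.set p.2.toNat (some p.1)) (List.replicate m.length none)
      = (List.range m.length).map (fun (k : Nat) => some (pvNameAt m (k : Int))) := by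
    apply List.ext_getElem?
    intro j
    by_cases hj : j < m.length
    · rw [pv_foldl_set_getElem m _ j (by simpa using hj)
          (fun p hp => by obtain ⟨k, _, hkid⟩ := hids p hp; simp [hkid]) hnd]
      have hjm : (j : Int) ∈ m.map Prod.snd :=
        hperm.mem_iff.mpr (List.mem_map.mpr ⟨j, List.mem_range.mpr hj, rfl⟩)
      rcases List.mem_map.mp hjm with ⟨p, hp, hpj⟩
      have hfind : m.find? (fun q => q.2 == (j : Int)) = some (p.1, (j : Int)) :=
        pv_find?_of_mem hnd (show (p.1, (j : Int)) ∈ m by rw [← hpj]; exact hp)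
      have hname : pvNameAt m ((j : Int)) = p.1 := by simp [pvNameAt, hfind]
      rw [hfind]
      simp [hj, hname]
    · have h1 : ¬ j < (m.foldl (fun r p => r.set p.2.toNat (some p.1))
          (List.replicate m.length none)).length := by
        rw [pv_length_foldl_set]; simpa using hj
      rw [List.getElem?_eq_none (by omega), List.getElem?_eq_none (by simpa using hj)]
  rw [hfold]
  simp [pvCanon, List.filterMap_map]

-- ===== VERDICT (by name: the statement is the Claim_ definition above) =====
theorem label_names_by_id_py_spec : Claim_equal_label_names_by_id_py := by
  intro m _hdom hpre
  unfold Spec_label_names_by_id_py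
  rw [pvA_eq_canon m hpre, pvB_eq_canon m hpre]
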